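-- pv_equiv track=rewrite | github.com/asalvaz/python | Amazon/Test1.py | decrece
-- ===== SOURCE A (Python) =====
-- def decrece(lista):
--     longitud = len(lista)
--     contador = 0
--     temp_numero_anterior = 0
--     Flag_todos_son_consecutivos = False
--     if longitud == 1:
--         return True
--     for indice in lista:
--         if(contador==0):
--             temp_numero_anterior = indice
--             Flag_todos_son_consecutivos=True
--             contador += contador + 1
--         #si es uno más que el anterior continua y agregalo al arreglo temporal"
--         elif(temp_numero_anterior-1 == indice):
--             temp_numero_anterior = indice
--             Flag_todos_son_consecutivos=True
--             contador += 1
--         else: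
--             Flag_todos_son_consecutivos=False
--             return Flag_todos_son_consecutivos
--     return Flag_todos_son_consecutivos
-- ===== SOURCE B (Python) =====
-- def decrece(lista):
--     if not lista:
--         return False
--     if len(lista) == 1:
--         return True
--     expected = [lista[0] - i for i in range(len(lista))]
--     return list(lista) == expected
-- ===== Notes on version B (the rewrite author's own statement) =====
-- stated objective: simpler
-- what changed: Replaces the stateful scan with counter/previous/flag variables by building the expected arithmetic sequence from the first element and doing a single list equality comparison.
import Mathlib
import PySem

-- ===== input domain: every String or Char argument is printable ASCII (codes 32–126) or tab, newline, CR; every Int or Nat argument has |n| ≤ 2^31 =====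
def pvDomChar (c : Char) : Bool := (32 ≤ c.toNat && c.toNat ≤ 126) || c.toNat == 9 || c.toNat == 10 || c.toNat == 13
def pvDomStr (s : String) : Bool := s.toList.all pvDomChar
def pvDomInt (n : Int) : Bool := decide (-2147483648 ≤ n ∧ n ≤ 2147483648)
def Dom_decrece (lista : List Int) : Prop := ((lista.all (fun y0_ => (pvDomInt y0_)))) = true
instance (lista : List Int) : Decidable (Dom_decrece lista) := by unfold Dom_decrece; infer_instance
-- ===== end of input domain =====

-- B replaces A's stateful counter/previous/flag scan by building the expected
-- decreasing sequence from the first element and one equality comparison (objective: simpler).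


-- ===== PORT A =====
-- the for-loop with its early return, carried state (contador, temp_numero_anterior, flag)
def decreceLoop (l : List Int) (contador temp : Int) (flag : Bool) : Bool :=
  match l with
  | [] => flag
  | indice :: rest =>
    if contador == 0 then
      decreceLoop rest (contador + (contador + 1)) indice true
    else if temp - 1 == indice then
      decreceLoop rest (contador + 1) indice true
    else
      false

def decrece (lista : List Int) : Bool :=
  if lista.length == 1 then true
  else decreceLoop lista 0 0 false

-- ===== PORT B =====
def decrece_alt (lista : List Int) : Bool :=
  match lista with
  | [] => false
  | x :: _ =>
    if lista.length == 1 then true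
    else lista == (List.range lista.length).map (fun (i : Nat) => x - (i : Int))

-- ===== PRECONDITION & SPEC =====
def Spec_decrece (lista : List Int) (out : Bool) : Prop := out = decrece_alt lista
instance (lista : List Int) (out : Bool) : Decidable (Spec_decrece lista out) := by unfold Spec_decrece; infer_instance

-- ===== CLAIM (what is proved, stated in full; the proofs are below) =====
def Claim_equal_decrece : Prop := ∀ (lista : List Int), Dom_decrece lista → Spec_decrece lista (decrece lista)

-- ===== LEMMAS AND PROOFS =====
-- peeling the head off the expected arithmetic sequence
theorem cons_map_range (b : Int) (n : Nat) :
    (List.range (n + 1)).map (fun (i : Nat) => b - (i : Int)) =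
      b :: (List.range n).map (fun (i : Nat) => b - 1 - (i : Int)) := by
  induction n generalizing b with
  | zero => simp
  | succ m ih =>
    rw [List.range_succ, List.map_append, ih b, List.range_succ, List.map_append]
    simp only [List.map_cons, List.map_nil, List.cons_append]
    have : b - (((m:Int)) + 1) = b - 1 - (m:Int) := by ring
    push_cast
    rw [this]

-- after the first element, the loop (contador ≠ 0) accepts exactly the sequence x-1, x-2, …
theorem decreceLoop_char (l : List Int) : ∀ (x c : Int), 1 ≤ c →
    decreceLoop l c x true =
      decide (l = (List.range l.length).map (fun (i : Nat) => (x - 1) - (i : Int))) := by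
  induction l with
  | nil => intro x c _; simp [decreceLoop]
  | cons i t ih =>
    intro x c hc
    have h0 : (c == 0) = false := by simp; omega
    rw [decreceLoop, h0]
    simp only [Bool.false_eq_true, if_false]
    rw [List.length_cons, cons_map_range (x - 1) t.length]
    by_cases h : x - 1 = i
    · have hb : (x - 1 == i) = true := by simp [h]
      rw [hb]
      simp only [if_true]
      rw [ih i (c + 1) (by omega)]
      subst h
      simp
    · have hb : (x - 1 == i) = false := by simp [h]
      rw [hb]
      simp only [Bool.false_eq_true, if_false]
      rw [eq_comm, decide_eq_false_iff_not]
      intro he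
      injection he with h1 _
      exact h h1.symm

-- ===== VERDICT (by name: the statement is the Claim_ definition above) =====
theorem decrece_spec : Claim_equal_decrece := by
  intro lista _
  unfold Spec_decrece decrece decrece_alt
  match lista with
  | [] => simp [decreceLoop]
  | x :: t =>
    by_cases h1 : t = []
    · subst h1; simp
    · have hlen : ((x :: t).length == 1) = false := by
        simp [List.length_eq_zero_iff]; exact h1
      rw [hlen]
      simp only [Bool.false_eq_true, if_false]
      rw [decreceLoop]
      simp only [BEq.rfl, if_true]
      rw [decreceLoop_char t x (0 + (0 + 1)) (by omega)]
      rw [List.length_cons, cons_map_range x t.length]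
      by_cases he : t = (List.range t.length).map (fun (i : Nat) => x - 1 - (i : Int))
      · rw [he]; simp
      · rw [decide_eq_false he, eq_comm, beq_eq_false_iff_ne]
        simp only [ne_eq, List.cons.injEq, not_and]
        intro _ h2
        exact he h2
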